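-- pv_equiv track=rewrite | github.com/nahcooy/2023_1_pythonclass | 프원실_과제13_dataupload_201918371_최유찬/hw_13_raindata.py | maxtemp
-- ===== SOURCE A (Python) =====
-- def maxtemp(tmm):
--     tgmaxd, tgmax = tmm[0][0], (tmm[0][1]-tmm[0][2])
--     tmaxd, tmax = tmm[0][0], tmm[0][1]
--     for i in range(1, len(tmm)):
--         if (tmm[i][1] - tmm[i][2]) > tgmax:
--             tgmaxd, tgmax = tmm[i][0], (tmm[i][1]-tmm[i][2])
--         if tmm[i][1] > tmax:
--             tmaxd, tmax = tmm[i][0], tmm[i][1]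
--     return tmaxd, tmax, tgmaxd, tgmax
-- ===== SOURCE B (Python) =====
-- def maxtemp(tmm):
--     bt, bd = _best(tmm)
--     return bt[0], bt[1], bd[0], bd[1] - bd[2]
--
--
-- def _best(rows):
--     # divide and conquer: first-maximal row by temperature and by temp-diff
--     if len(rows) == 1:
--         return rows[0], rows[0]
--     mid = len(rows) // 2
--     lt, ld = _best(rows[:mid])
--     rt, rd = _best(rows[mid:])
--     bt = lt if lt[1] >= rt[1] else rt
--     bd = ld if ld[1] - ld[2] >= rd[1] - rd[2] else rd
--     return bt, bd
-- ===== Notes on version B (the rewrite author's own statement) =====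
-- stated objective: alternative
-- what changed: Replaced A's single indexed accumulator loop with a divide-and-conquer recursion that splits the list in half, recursively computes each half's first-maximal row by temperature and by temperature difference, and merges the two pairs (left wins ties, preserving first-wins).
import Mathlib
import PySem

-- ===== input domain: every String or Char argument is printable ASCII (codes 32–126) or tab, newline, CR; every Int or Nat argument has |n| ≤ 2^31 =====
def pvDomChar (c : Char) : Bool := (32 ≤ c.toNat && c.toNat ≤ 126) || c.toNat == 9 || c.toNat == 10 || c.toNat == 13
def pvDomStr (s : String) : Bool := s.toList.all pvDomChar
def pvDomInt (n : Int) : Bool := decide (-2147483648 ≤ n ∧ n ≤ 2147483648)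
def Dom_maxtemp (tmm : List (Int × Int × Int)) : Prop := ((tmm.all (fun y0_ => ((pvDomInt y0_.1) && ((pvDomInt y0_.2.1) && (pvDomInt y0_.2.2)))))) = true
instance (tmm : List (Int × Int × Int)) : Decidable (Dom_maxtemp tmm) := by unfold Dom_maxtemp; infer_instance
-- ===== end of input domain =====

-- B replaces A's single indexed accumulator loop with a divide-and-conquer recursion merging per-half first-maximal rows (alternative; same O(n) cost).
-- Pre_ excludes the empty list, on which A raises IndexError (B's recursion does not return there either).


-- ===== PORT A =====
-- literal port of A's loop: state (tmaxd, tmax, tgmaxd, tgmax), loop over range(1, len(tmm));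
-- tmm[0]/tmm[i] are in range whenever Pre_ holds, so pyGetD's default is never used there
def maxtemp (tmm : List (Int × Int × Int)) : Int × Int × Int × Int :=
  let h := PySem.List.pyGetD tmm 0 (0, 0, 0)
  (PySem.List.pyRange 1 (PySem.List.len tmm) 1).foldl
    (fun st i =>
      let r := PySem.List.pyGetD tmm i (0, 0, 0)
      let st1 := if r.2.1 - r.2.2 > st.2.2.2 then (st.1, st.2.1, r.1, r.2.1 - r.2.2) else st
      if r.2.1 > st1.2.1 then (r.1, r.2.1, st1.2.2.1, st1.2.2.2) else st1)
    (h.1, h.2.1, h.1, h.2.1 - h.2.2)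

-- ===== PORT B =====
-- port of Source B's _best: divide and conquer on the list; rows[:mid]/rows[mid:] become take/drop.
-- On the empty list Python's _best recurses forever (no value); the port returns a dummy there,
-- which is outside Pre_maxtemp.
def pvBest : List (Int × Int × Int) → (Int × Int × Int) × (Int × Int × Int)
  | [] => ((0, 0, 0), (0, 0, 0))
  | [r] => (r, r)
  | x :: y :: rest =>
    let rows := x :: y :: rest
    let mid := rows.length / 2
    let lb := pvBest (rows.take mid)
    let rb := pvBest (rows.drop mid)
    ((if lb.1.2.1 ≥ rb.1.2.1 then lb.1 else rb.1),
     (if lb.2.2.1 - lb.2.2.2 ≥ rb.2.2.1 - rb.2.2.2 then lb.2 else rb.2))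
termination_by xs => xs.length
decreasing_by
  · simp; omega
  · simp; omega

def maxtemp_alt (tmm : List (Int × Int × Int)) : Int × Int × Int × Int :=
  let b := pvBest tmm
  (b.1.1, b.1.2.1, b.2.1, b.2.2.1 - b.2.2.2)

-- ===== PRECONDITION & SPEC =====
-- A raises IndexError on the empty list (and B's recursion never returns there): excluded
def Pre_maxtemp (tmm : List (Int × Int × Int)) : Prop := tmm ≠ []
instance (tmm : List (Int × Int × Int)) : Decidable (Pre_maxtemp tmm) := by unfold Pre_maxtemp; infer_instance
def pvWitness_maxtemp : (List (Int × Int × Int)) := [(1, 5, 2), (2, 7, 7)]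

def Spec_maxtemp (tmm : List (Int × Int × Int)) (out : Int × Int × Int × Int) : Prop := out = maxtemp_alt tmm
instance (tmm : List (Int × Int × Int)) (out : Int × Int × Int × Int) : Decidable (Spec_maxtemp tmm out) := by unfold Spec_maxtemp; infer_instance

-- ===== CLAIM (what is proved, stated in full; the proofs are below) =====
def Claim_equal_maxtemp : Prop := ∀ (tmm : List (Int × Int × Int)), Dom_maxtemp tmm → Pre_maxtemp tmm → Spec_maxtemp tmm (maxtemp tmm)

-- ===== LEMMAS AND PROOFS =====

-- first-wins running max over a key, the common value of both sides
def pvRun (k : (Int × Int × Int) → Int) (a : Int × Int × Int) (t : List (Int × Int × Int)) :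
    Int × Int × Int :=
  t.foldl (fun m x => if k m < k x then x else m) a

theorem pvRun_swap (k : (Int × Int × Int) → Int) (a b : Int × Int × Int)
    (ys : List (Int × Int × Int)) :
    pvRun k (if k a < k b then b else a) ys = (let r := pvRun k b ys; if k a < k r then r else a) := by
  induction ys generalizing b with
  | nil => rfl
  | cons y ys ih =>
      have assoc : (if k (if k a < k b then b else a) < k y then y else (if k a < k b then b else a))
          = (if k a < k (if k b < k y then y else b) then (if k b < k y then y else b) else a) := by
        split_ifs <;> first | rfl | omega
      show pvRun k (if k (if k a < k b then b else a) < k y then y else (if k a < k b then b else a)) ys = _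
      rw [assoc, ih]
      rfl

-- the running max splits across a concatenation, left wins ties
theorem pvRun_append (k : (Int × Int × Int) → Int) (a b : Int × Int × Int)
    (l r : List (Int × Int × Int)) :
    pvRun k a (l ++ b :: r)
      = (if k (pvRun k a l) ≥ k (pvRun k b r) then pvRun k a l else pvRun k b r) := by
  have h1 : pvRun k a (l ++ b :: r) = pvRun k (if k (pvRun k a l) < k b then b else (pvRun k a l)) r := by
    simp [pvRun, List.foldl_append]
  rw [h1, pvRun_swap]
  simp only
  split_ifs <;> first | rfl | omega

-- divide and conquer computes the two first-wins running maxima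
theorem pvBest_cons : ∀ (n : Nat) (a : Int × Int × Int) (t : List (Int × Int × Int)),
    t.length ≤ n →
    pvBest (a :: t) = (pvRun (fun r => r.2.1) a t, pvRun (fun r => r.2.1 - r.2.2) a t) := by
  intro n
  induction n with
  | zero =>
      intro a t ht
      have : t = [] := List.eq_nil_of_length_eq_zero (Nat.le_zero.mp ht)
      subst this; simp [pvBest, pvRun]
  | succ n ih =>
      intro a t ht
      match t with
      | [] => simp [pvBest, pvRun]
      | y :: rest =>
        rw [pvBest]
        have hL : (a :: y :: rest).length = rest.length + 2 := by simp
        obtain ⟨m, hm⟩ : ∃ m, (a :: y :: rest).length / 2 = m + 1 := ⟨(a :: y :: rest).length / 2 - 1, by omega⟩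
        rw [hm]
        have htake : (a :: y :: rest).take (m + 1) = a :: (y :: rest).take m := by
          rw [List.take_succ_cons]
        have hdropne : (a :: y :: rest).drop (m + 1) ≠ [] := by
          intro h
          have := List.length_drop (l := (a :: y :: rest)) (i := m + 1)
          rw [h] at this; simp at this; omega
        obtain ⟨b, r', hdr⟩ := List.exists_cons_of_ne_nil hdropne
        have hdrop' : (a :: y :: rest).drop (m + 1) = (y :: rest).drop m := by
          rw [List.drop_succ_cons]
        have hlen1 : ((y :: rest).take m).length ≤ n := by
          simp at ht ⊢; omega
        have hlen2 : r'.length ≤ n := by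
          have := List.length_drop (l := (a :: y :: rest)) (i := m + 1)
          rw [hdr] at this; simp at this ht ⊢; omega
        have hsplit : y :: rest = (y :: rest).take m ++ b :: r' := by
          rw [← hdr, hdrop', List.take_append_drop]
        have e1 : pvRun (fun r => r.2.1) a (y :: rest)
            = (if (pvRun (fun r => r.2.1) a ((y :: rest).take m)).2.1
                  ≥ (pvRun (fun r => r.2.1) b r').2.1
               then pvRun (fun r => r.2.1) a ((y :: rest).take m)
               else pvRun (fun r => r.2.1) b r') := by
          conv_lhs => rw [hsplit]
          exact pvRun_append _ a b _ r'
        have e2 : pvRun (fun r => r.2.1 - r.2.2) a (y :: rest)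
            = (if (pvRun (fun r => r.2.1 - r.2.2) a ((y :: rest).take m)).2.1
                    - (pvRun (fun r => r.2.1 - r.2.2) a ((y :: rest).take m)).2.2
                  ≥ (pvRun (fun r => r.2.1 - r.2.2) b r').2.1
                    - (pvRun (fun r => r.2.1 - r.2.2) b r').2.2
               then pvRun (fun r => r.2.1 - r.2.2) a ((y :: rest).take m)
               else pvRun (fun r => r.2.1 - r.2.2) b r') := by
          conv_lhs => rw [hsplit]
          exact pvRun_append _ a b _ r'
        rw [htake, hdr, ih a _ hlen1, ih b r' hlen2, e1, e2]

-- port A's combined fold is the pair of the two independent first-wins running maxima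
theorem combined_fold (t : List (Int × Int × Int)) (a b : Int × Int × Int) :
    t.foldl
      (fun st r =>
        let st1 := if r.2.1 - r.2.2 > st.2.2.2 then (st.1, st.2.1, r.1, r.2.1 - r.2.2) else st
        if r.2.1 > st1.2.1 then (r.1, r.2.1, st1.2.2.1, st1.2.2.2) else st1)
      (a.1, a.2.1, b.1, b.2.1 - b.2.2)
    = (let m1 := pvRun (fun r => r.2.1) a t
       let m2 := pvRun (fun r => r.2.1 - r.2.2) b t
       (m1.1, m1.2.1, m2.1, m2.2.1 - m2.2.2)) := by
  induction t generalizing a b with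
  | nil => rfl
  | cons y ys ih =>
      simp only [List.foldl_cons, pvRun, gt_iff_lt]
      by_cases h2 : b.2.1 - b.2.2 < y.2.1 - y.2.2 <;>
        by_cases h1 : a.2.1 < y.2.1 <;>
          simp only [h1, h2, if_pos, if_neg, not_false_iff] <;>
            first
              | simpa [pvRun] using ih y y
              | simpa [pvRun] using ih a y
              | simpa [pvRun] using ih y b
              | simpa [pvRun] using ih a b

-- ===== VERDICT (by name: the statement is the Claim_ definition above) =====
theorem maxtemp_spec : Claim_equal_maxtemp := by
  intro tmm _ hpre
  obtain ⟨h, t, rfl⟩ := List.exists_cons_of_ne_nil hpre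
  show maxtemp (h :: t) = maxtemp_alt (h :: t)
  unfold maxtemp maxtemp_alt
  have hget : PySem.List.pyGetD (h :: t) 0 ((0 : Int), (0 : Int), (0 : Int)) = h := by
    simp [PySem.List.pyGetD, PySem.List.pyGet?, PySem.List.pyIdx?]
  simp only [hget]
  have hfold := PySem.List.foldl_pyRange_pyGetD (xs := h :: t) (a := 1)
    (d := ((0 : Int), (0 : Int), (0 : Int)))
    (f := fun st (r : Int × Int × Int) =>
      let st1 := if r.2.1 - r.2.2 > st.2.2.2 then (st.1, st.2.1, r.1, r.2.1 - r.2.2) else st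
      if r.2.1 > st1.2.1 then (r.1, r.2.1, st1.2.2.1, st1.2.2.2) else st1)
    (init := (h.1, h.2.1, h.1, h.2.1 - h.2.2)) (by norm_num)
  rw [hfold, combined_fold, pvBest_cons t.length h t le_rfl]
  simp
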